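-- pv_equiv track=rewrite | github.com/bellcastro/validaID | validaID.py | validaID
-- ===== SOURCE A (Python) =====
-- def validaID (id):
--     especiais = "[^-áéíóúÁÉÍÓÚâêîôÂÊÎÔãõÃÕçÇ:]#*.,!@#$%¨&*()_{^}<>/º°"
--     if len(id) > 0 and len(id) < 7:
--         try:
--             int (id[0])
--         except ValueError:
--             novo_id = id
--             for x in especiais:
--                 novo_id = novo_id.replace(x, '')
--             if novo_id == id:
--                 return True
--     return False
-- ===== SOURCE B (Python) =====
-- _ESPECIAIS = frozenset("[^-áéíóúÁÉÍÓÚâêîôÂÊÎÔãõÃÕçÇ:]#*.,!@#$%¨&*()_{^}<>/º°")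
--
-- def validaID(id):
--     # On ASCII input, int(id[0]) succeeds exactly when id[0] is one of '0'..'9'.
--     return 0 < len(id) < 7 and id[0] not in "0123456789" and _ESPECIAIS.isdisjoint(id)
-- ===== Notes on version B (the rewrite author's own statement) =====
-- stated objective: simpler
-- what changed: B replaces A's try/except int() probe and its loop over the 53 special characters rebuilding the string with repeated .replace by one boolean expression: a length window, a direct first-char digit test (exact for int() on the ASCII domain), and frozenset.isdisjoint(id).
import Mathlib
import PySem

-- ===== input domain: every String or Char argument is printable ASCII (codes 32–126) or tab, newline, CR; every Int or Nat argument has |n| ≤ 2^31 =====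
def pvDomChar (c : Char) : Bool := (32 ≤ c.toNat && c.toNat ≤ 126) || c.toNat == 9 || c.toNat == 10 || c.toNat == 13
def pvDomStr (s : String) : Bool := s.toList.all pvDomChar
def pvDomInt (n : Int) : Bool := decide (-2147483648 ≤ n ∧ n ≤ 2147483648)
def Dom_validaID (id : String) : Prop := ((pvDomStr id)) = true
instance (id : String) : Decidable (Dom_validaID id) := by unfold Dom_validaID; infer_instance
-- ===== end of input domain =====

-- B replaces A's try/except int() probe and replace-loop by a single boolean expression:
-- length window, first char not a decimal digit (exact for int() on the ASCII domain), and
-- a disjointness test of id against a precomputed set of special characters.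


-- ===== PORT A =====
def validaID (id : String) : Bool :=
  let especiais : String := "[^-áéíóúÁÉÍÓÚâêîôÂÊÎÔãõÃÕçÇ:]#*.,!@#$%¨&*()_{^}<>/º°"
  if 0 < PySem.Str.len id ∧ PySem.Str.len id < 7 then
    match PySem.Str.pyGet? id 0 with
    | none => false   -- unreachable: len id > 0
    | some c =>
      match PySem.Int.ofChars? [c] with
      | some _ => false                   -- int(id[0]) succeeded: fall through to `return False`
      | none =>                           -- ValueError branch
        let novo_id := especiais.toList.foldl
          (fun s x => PySem.Str.replace s (String.ofList [x]) "") id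
        novo_id == id
  else false

-- ===== PORT B =====
def pvEspeciaisSet : List Char :=
  PySem.Set.ofList "[^-áéíóúÁÉÍÓÚâêîôÂÊÎÔãõÃÕçÇ:]#*.,!@#$%¨&*()_{^}<>/º°".toList

def validaID_alt (id : String) : Bool :=
  match id.toList with
  | [] => false                                  -- 0 < len(id) fails
  | c :: cs =>
      decide (cs.length < 6)                     -- len(id) < 7
        && !("0123456789".toList.contains c)     -- id[0] not in "0123456789"
        && (c :: cs).all (fun ch => !(pvEspeciaisSet.contains ch))   -- isdisjoint

-- ===== PRECONDITION & SPEC =====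
def Spec_validaID (id : String) (out : Bool) : Prop := out = validaID_alt id
instance (id : String) (out : Bool) : Decidable (Spec_validaID id out) := by unfold Spec_validaID; infer_instance

-- ===== CLAIM (what is proved, stated in full; the proofs are below) =====
def Claim_equal_validaID : Prop := ∀ (id : String), Dom_validaID id → Spec_validaID id (validaID id)

-- ===== LEMMAS AND PROOFS =====

-- on ASCII chars, int(c) succeeds exactly when c is a decimal digit
set_option maxRecDepth 8000 in
theorem ofChars_single_dom :
    ∀ n ∈ List.range 127,
      (PySem.Int.ofChars? [Char.ofNat n]).isNone
        = !("0123456789".toList.contains (Char.ofNat n)) := by decide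

-- str.replace(x, '') for a single character x is exactly 'filter out x'
theorem replace_go_single (x : Char) :
    ∀ (fuel : Nat) (l acc : List Char), l.length ≤ fuel →
      PySem.Chars.replace.go [x] [] fuel l acc
        = acc.reverse ++ l.filter (fun c => !(c == x)) := by
  intro fuel
  induction fuel with
  | zero =>
    intro l acc h
    have : l = [] := List.eq_nil_of_length_eq_zero (Nat.le_zero.mp h)
    subst this
    simp [PySem.Chars.replace.go]
  | succ n ih =>
    intro l acc h
    cases l with
    | nil => simp [PySem.Chars.replace.go]
    | cons c t =>
      by_cases hc : c = x
      · subst hc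
        have hp : List.isPrefixOf [c] (c :: t) = true := by
          simp [List.isPrefixOf]
        simp only [PySem.Chars.replace.go, hp, if_pos, List.length_cons, List.length_nil,
          List.drop_succ_cons, List.drop_zero, List.reverse_nil, List.nil_append]
        rw [ih t acc (Nat.le_of_succ_le_succ h)]
        simp
      · have hp : List.isPrefixOf [x] (c :: t) = false := by
          simp [List.isPrefixOf]
          exact fun hxc => hc hxc.symm
        simp only [PySem.Chars.replace.go, hp, Bool.false_eq_true, if_false]
        rw [ih t (c :: acc) (Nat.le_of_succ_le_succ h)]
        simp [hc]

theorem replace_single (x : Char) (cs : List Char) :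
    PySem.Chars.replace cs [x] [] = cs.filter (fun c => !(c == x)) := by
  rw [PySem.Chars.replace]
  simp only [List.isEmpty_cons, Bool.false_eq_true, if_false]
  exact replace_go_single x cs.length cs [] le_rfl

-- A's whole replace-loop filters out every character occurring in L
theorem foldl_replace_filter (L : List Char) :
    ∀ (s : String),
      L.foldl (fun s x => PySem.Str.replace s (String.ofList [x]) "") s
        = String.ofList (s.toList.filter (fun c => !(L.contains c))) := by
  induction L with
  | nil =>
    intro s
    simp only [List.foldl_nil, List.contains_nil, Bool.not_false, List.filter_true]
    exact String.ofList_toList.symm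
  | cons x L ih =>
    intro s
    simp only [List.foldl_cons]
    rw [ih]
    congr 1
    have h1 : (PySem.Str.replace s (String.ofList [x]) "").toList
        = s.toList.filter (fun c => !(c == x)) := by
      rw [PySem.Str.toList_replace]
      simp only [String.toList_ofList]
      have : ("" : String).toList = [] := rfl
      rw [this, replace_single]
    rw [h1, List.filter_filter]
    apply List.filter_congr
    intro c _
    simp only [List.contains_cons, Bool.not_or]
    exact Bool.and_comm _ _

set_option maxRecDepth 4000 in
theorem contains_especiais (ch : Char) :
    pvEspeciaisSet.contains ch
      = "[^-áéíóúÁÉÍÓÚâêîôÂÊÎÔãõÃÕçÇ:]#*.,!@#$%¨&*()_{^}<>/º°".toList.contains ch := by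
  apply Bool.eq_iff_iff.mpr
  simp only [List.contains_iff_mem]
  unfold pvEspeciaisSet
  exact PySem.Set.mem_ofList _ _

-- A's replace-loop result equals the original string iff no character of id is special
theorem noSpecial_iff (id : String) :
    ((("[^-áéíóúÁÉÍÓÚâêîôÂÊÎÔãõÃÕçÇ:]#*.,!@#$%¨&*()_{^}<>/º°" : String).toList.foldl
        (fun s x => PySem.Str.replace s (String.ofList [x]) "") id) == id)
      = id.toList.all (fun ch => !(pvEspeciaisSet.contains ch)) := by
  rw [foldl_replace_filter]
  apply Bool.eq_iff_iff.mpr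
  rw [beq_iff_eq, List.all_eq_true]
  constructor
  · intro heq ch hch
    have hfil : id.toList.filter
        (fun c => !("[^-áéíóúÁÉÍÓÚâêîôÂÊÎÔãõÃÕçÇ:]#*.,!@#$%¨&*()_{^}<>/º°".toList.contains c))
        = id.toList := by
      have := congrArg String.toList heq
      simpa [String.toList_ofList] using this
    have := (List.filter_eq_self.mp hfil) ch hch
    rw [contains_especiais]
    simpa using this
  · intro hall
    have hfil : id.toList.filter
        (fun c => !("[^-áéíóúÁÉÍÓÚâêîôÂÊÎÔãõÃÕçÇ:]#*.,!@#$%¨&*()_{^}<>/º°".toList.contains c))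
        = id.toList := by
      apply List.filter_eq_self.mpr
      intro c hcmem
      have := hall c hcmem
      rw [contains_especiais] at this
      simpa using this
    rw [hfil]
    exact String.ofList_toList

theorem validaID_spec_aux (id : String) (hdom : Dom_validaID id) :
    validaID id = validaID_alt id := by
  unfold validaID validaID_alt
  rcases hl : id.toList with _ | ⟨c, cs⟩
  · have hlen : PySem.Str.len id = 0 := by simp [PySem.Str.len_eq, hl]
    rw [if_neg (by rw [hlen]; omega)]
  · have hlen : PySem.Str.len id = (cs.length : Int) + 1 := by
      simp [PySem.Str.len_eq, hl]
    have hget : PySem.Str.pyGet? id 0 = some c := by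
      simp [PySem.Str.pyGet?, hl]
    by_cases hsz : cs.length < 6
    · have hcond : 0 < PySem.Str.len id ∧ PySem.Str.len id < 7 := by
        rw [hlen]; constructor <;> omega
      rw [if_pos hcond, hget]
      simp only []
      -- ASCII: c is in Dom, so ofChars? [c] is none iff c is not a decimal digit
      have hdom' : (c :: cs).all pvDomChar = true := by
        unfold Dom_validaID pvDomStr at hdom; rw [hl] at hdom; exact hdom
      have hc : pvDomChar c = true := (List.all_eq_true.mp hdom') c (by simp)
      have hle : c.toNat < 127 := by
        simp only [pvDomChar, Bool.or_eq_true, Bool.and_eq_true, decide_eq_true_eq,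
          beq_iff_eq] at hc
        omega
      have hofn : Char.ofNat c.toNat = c := Char.ofNat_toNat c
      have hkey := ofChars_single_dom c.toNat (List.mem_range.mpr hle)
      rw [hofn] at hkey
      cases h2 : PySem.Int.ofChars? [c] with
      | some n =>
        have hdig : ("0123456789".toList.contains c) = true := by
          have h3 : (PySem.Int.ofChars? [c]).isNone = false := by simp [h2]
          rw [hkey] at h3
          cases hx : ("0123456789".toList.contains c) with
          | false => rw [hx] at h3; simp at h3
          | true => rfl
        simp only [hdig, Bool.not_true, Bool.and_false, Bool.false_and]
      | none =>
        have hd : ("0123456789".toList.contains c) = false := by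
          have h3 : (PySem.Int.ofChars? [c]).isNone = true := by simp [h2]
          rw [hkey] at h3
          cases hx : ("0123456789".toList.contains c) with
          | false => rfl
          | true => rw [hx] at h3; simp at h3
        have hns := noSpecial_iff id
        rw [hl] at hns
        simp only []
        rw [hns, hd, decide_eq_true hsz]
        simp only [Bool.not_false, Bool.true_and]
    · have hcond : ¬ (0 < PySem.Str.len id ∧ PySem.Str.len id < 7) := by
        rw [hlen]; intro h; omega
      rw [if_neg hcond]
      have hdec : decide (cs.length < 6) = false := by simp [hsz]
      simp only [hdec, Bool.false_and]

-- ===== VERDICT (by name: the statement is the Claim_ definition above) =====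
theorem validaID_spec : Claim_equal_validaID := by
  intro id hdom
  unfold Spec_validaID
  exact validaID_spec_aux id hdom
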